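-- pv_equiv track=rewrite | github.com/42charlie/pdf-qa-app | backend/services/chunker.py | split_large_block
-- ===== SOURCE A (Python) =====
-- def split_large_block(block: str, max_size: int) -> list:
--     """
--     Split a single large block into smaller pieces using:
--     sentence → space → hard cut fallback
--     """
--     chunks = []
--     start = 0
--     length = len(block)
--
--     while start < length:
--         end = start + max_size
--
--         if end >= length:
--             chunks.append(block[start:].strip())
--             break
--
--         # Try to split at sentence boundary
--         split_pos = block.rfind(".", start, end)
--         if split_pos == -1:
--             split_pos = block.rfind(" ", start, end)
--
--         # Fallback: hard cut
--         if split_pos == -1 or split_pos <= start: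
--             split_pos = end
--
--         chunks.append(block[start:split_pos].strip())
--         start = split_pos
--
--     return [c for c in chunks if c]
-- ===== SOURCE B (Python) =====
-- def _bisect_left(a, x):
--     # hand-written bisect_left (a sorted ascending): first index k with a[k] >= x
--     lo = 0
--     hi = len(a)
--     while lo < hi:
--         mid = (lo + hi) // 2
--         if a[mid] < x:
--             lo = mid + 1
--         else:
--             hi = mid
--     return lo
--
-- def _rightmost_in(positions, start, end):
--     # rightmost p in the sorted list positions with start <= p < end, else -1
--     k = _bisect_left(positions, end)
--     if k > 0 and positions[k - 1] >= start:
--         return positions[k - 1]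
--     return -1
--
-- def split_large_block(block: str, max_size: int) -> list:
--     # One forward pass collects every dot/space position; each window then
--     # finds its split point by binary search on those sorted position lists.
--     dots = [i for i, ch in enumerate(block) if ch == "."]
--     spaces = [i for i, ch in enumerate(block) if ch == " "]
--     chunks = []
--     start = 0
--     length = len(block)
--     while start < length:
--         end = start + max_size
--         if end >= length:
--             chunks.append(block[start:].strip())
--             break
--         split_pos = _rightmost_in(dots, start, end)
--         if split_pos == -1:
--             split_pos = _rightmost_in(spaces, start, end)
--         if split_pos == -1 or split_pos <= start:
--             split_pos = end
--         chunks.append(block[start:split_pos].strip())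
--         start = split_pos
--     return [c for c in chunks if c]
-- ===== Notes on version B (the rewrite author's own statement) =====
-- stated objective: alternative
-- what changed: Instead of an O(window) rfind scan per chunk, B collects all '.' and ' ' positions in one forward pass and finds each window's rightmost separator by binary search on those sorted position lists, keeping the same window loop, fallback, strip and empty filter.
import Mathlib
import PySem

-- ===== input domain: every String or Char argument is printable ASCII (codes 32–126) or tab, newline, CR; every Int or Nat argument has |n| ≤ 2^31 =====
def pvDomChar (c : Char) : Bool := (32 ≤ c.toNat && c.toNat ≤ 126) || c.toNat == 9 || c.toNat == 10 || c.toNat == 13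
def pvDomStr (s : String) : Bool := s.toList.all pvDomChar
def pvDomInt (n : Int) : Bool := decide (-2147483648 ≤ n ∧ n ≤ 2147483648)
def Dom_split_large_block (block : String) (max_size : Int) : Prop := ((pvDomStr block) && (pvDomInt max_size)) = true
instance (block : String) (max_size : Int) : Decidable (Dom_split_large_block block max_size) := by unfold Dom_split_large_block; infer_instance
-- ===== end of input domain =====

-- B replaces A's per-window rfind scans by '.'/' ' position lists built once plus binary
-- search per window (objective: alternative; same chunks, fallback, strip and empty filter).

-- ===== PORT A =====
-- A's while-loop as structural recursion on fuel; under Pre_ (max_size ≥ 1) start strictly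
-- increases each iteration, so fuel = len(block) iterations reproduce the Python loop exactly.
def pvALoop (block : String) (max_size : Int) : Nat → Int → List String
  | 0, _ => []
  | fuel+1, start =>
    if start < PySem.Str.len block then
      let e := start + max_size
      if PySem.Str.len block ≤ e then
        [PySem.Str.strip (PySem.Str.slice block (some start) none)]
      else
        let sp1 := PySem.Str.rfindFrom block "." start (some e)
        let sp2 := if sp1 = -1 then PySem.Str.rfindFrom block " " start (some e) else sp1
        let sp3 := if sp2 = -1 ∨ sp2 ≤ start then e else sp2
        PySem.Str.strip (PySem.Str.slice block (some start) (some sp3)) :: pvALoop block max_size fuel sp3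
    else []

def split_large_block (block : String) (max_size : Int) : List String :=
  (pvALoop block max_size block.toList.length 0).filter (fun c => decide (c ≠ ""))

-- ===== PORT B =====
-- [i for i, ch in enumerate(block) if ch == c]
def pvPositions (cs : List Char) (c : Char) : List Int :=
  ((PySem.List.enumerate cs 0).filter (fun p => p.2 == c)).map Prod.fst

-- Source B's hand-written _bisect_left is the textbook lo/hi loop (mid = (lo+hi)//2, a[mid] < x);
-- PySem.List.bisectLeft is that very loop, so it is the faithful port of it.
-- positions[k-1] is read with pyGet?/getD 0; the default is never used (0 < k ≤ len positions).
def pvRightmostIn (positions : List Int) (start e : Int) : Int :=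
  let k := PySem.List.bisectLeft positions e
  if 0 < k ∧ start ≤ (PySem.List.pyGet? positions ((k : Int) - 1)).getD 0 then
    (PySem.List.pyGet? positions ((k : Int) - 1)).getD 0
  else -1

def pvBLoop (block : String) (dots spaces : List Int) (max_size : Int) : Nat → Int → List String
  | 0, _ => []
  | fuel+1, start =>
    if start < PySem.Str.len block then
      let e := start + max_size
      if PySem.Str.len block ≤ e then
        [PySem.Str.strip (PySem.Str.slice block (some start) none)]
      else
        let sp1 := pvRightmostIn dots start e
        let sp2 := if sp1 = -1 then pvRightmostIn spaces start e else sp1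
        let sp3 := if sp2 = -1 ∨ sp2 ≤ start then e else sp2
        PySem.Str.strip (PySem.Str.slice block (some start) (some sp3)) :: pvBLoop block dots spaces max_size fuel sp3
    else []

def split_large_block_alt (block : String) (max_size : Int) : List String :=
  let dots := pvPositions block.toList '.'
  let spaces := pvPositions block.toList ' '
  (pvBLoop block dots spaces max_size block.toList.length 0).filter (fun c => decide (c ≠ ""))

-- ===== PRECONDITION & SPEC =====
-- Pre_ excludes max_size < 1 on a nonempty block: there A's while-loop never makes progress
-- (split_pos falls back to end = start + max_size ≤ start) and the Python loops forever, returning nothing.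
def Pre_split_large_block (block : String) (max_size : Int) : Prop := block = "" ∨ 1 ≤ max_size
instance (block : String) (max_size : Int) : Decidable (Pre_split_large_block block max_size) := by
  unfold Pre_split_large_block; infer_instance

def pvWitness_split_large_block : String × Int := ("ab. cd ef. g", 5)

def Spec_split_large_block (block : String) (max_size : Int) (out : List String) : Prop := out = split_large_block_alt block max_size
instance (block : String) (max_size : Int) (out : List String) : Decidable (Spec_split_large_block block max_size out) := by unfold Spec_split_large_block; infer_instance

-- ===== CLAIM (what is proved, stated in full; the proofs are below) =====
def Claim_equal_split_large_block : Prop := ∀ (block : String) (max_size : Int), Dom_split_large_block block max_size → Pre_split_large_block block max_size → Spec_split_large_block block max_size (split_large_block block max_size)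

-- ===== LEMMAS AND PROOFS =====

-- "r is the rightmost index i ∈ [a, b) with cs[i] = c, or -1 if there is none"
def pvIsBest (cs : List Char) (c : Char) (a b r : Int) : Prop :=
  (r = -1 ∧ ∀ i : Nat, a ≤ (i : Int) → (i : Int) < b → cs[i]? ≠ some c) ∨
  (∃ i : Nat, r = (i : Int) ∧ a ≤ (i : Int) ∧ (i : Int) < b ∧ cs[i]? = some c ∧
    ∀ k : Nat, i < k → (k : Int) < b → cs[k]? ≠ some c)

theorem pvIsBest_unique (cs : List Char) (c : Char) (a b r₁ r₂ : Int)
    (h₁ : pvIsBest cs c a b r₁) (h₂ : pvIsBest cs c a b r₂) : r₁ = r₂ := by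
  rcases h₁ with ⟨e1, n1⟩ | ⟨i, ri, hai, hib, hci, hmax⟩
  · rcases h₂ with ⟨e2, _⟩ | ⟨i2, ri2, hai2, hib2, hci2, _⟩
    · rw [e1, e2]
    · exact absurd hci2 (n1 i2 hai2 hib2)
  · rcases h₂ with ⟨e2, n2⟩ | ⟨i2, ri2, hai2, hib2, hci2, hmax2⟩
    · exact absurd hci (n2 i hai hib)
    · rw [ri, ri2]
      rcases lt_trichotomy i i2 with h | h | h
      · exact absurd hci2 (hmax i2 h hib2)
      · rw [h]
      · exact absurd hci (hmax2 i h hib)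

theorem pvPrefix_singleton (c : Char) (t : List Char) :
    [c].isPrefixOf t = true ↔ t[0]? = some c := by
  cases t with
  | nil => simp [List.isPrefixOf]
  | cons a t =>
    simp [List.isPrefixOf]
    constructor <;> (intro h; exact h.symm)

theorem pvGo_spec (s : List Char) (c : Char) (j : Nat) :
    (PySem.Chars.rfind.go s [c] j = -1 ∧ ∀ i : Nat, i ≤ j → s[i]? ≠ some c) ∨
    (∃ i : Nat, PySem.Chars.rfind.go s [c] j = (i : Int) ∧ i ≤ j ∧ s[i]? = some c ∧
      ∀ k : Nat, i < k → k ≤ j → s[k]? ≠ some c) := by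
  induction j with
  | zero =>
    by_cases hp : [c].isPrefixOf s = true
    · right
      refine ⟨0, ?_, le_rfl, ?_, ?_⟩
      · simp [PySem.Chars.rfind.go, hp]
      · simpa using (pvPrefix_singleton c s).mp hp
      · intro k hk hk0; omega
    · left
      constructor
      · simp [PySem.Chars.rfind.go, hp]
      · intro i hi
        interval_cases i
        intro hc
        exact hp ((pvPrefix_singleton c s).mpr (by simpa using hc))
  | succ j ih =>
    have hdrop : (s.drop (j+1))[0]? = s[j+1]? := by
      rw [List.getElem?_drop]
    by_cases hp : [c].isPrefixOf (s.drop (j+1)) = true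
    · right
      refine ⟨j+1, ?_, le_rfl, ?_, ?_⟩
      · simp [PySem.Chars.rfind.go, hp]
      · rw [← hdrop]; exact (pvPrefix_singleton c _).mp hp
      · intro k hk hk1; omega
    · have hne : s[j+1]? ≠ some c := by
        intro hc
        exact hp ((pvPrefix_singleton c _).mpr (by rw [hdrop]; exact hc))
      have hstep : PySem.Chars.rfind.go s [c] (j+1) = PySem.Chars.rfind.go s [c] j := by
        simp [PySem.Chars.rfind.go, hp]
      rcases ih with ⟨h1, h2⟩ | ⟨i, hi1, hi2, hi3, hi4⟩
      · left
        refine ⟨by rw [hstep, h1], ?_⟩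
        intro i hi
        rcases Nat.lt_or_ge i (j+1) with h | h
        · exact h2 i (by omega)
        · have : i = j + 1 := by omega
          rw [this]; exact hne
      · right
        refine ⟨i, by rw [hstep, hi1], by omega, hi3, ?_⟩
        intro k hk hk1
        rcases Nat.lt_or_ge k (j+1) with h | h
        · exact hi4 k hk (by omega)
        · have : k = j + 1 := by omega
          rw [this]; exact hne

theorem pvRfind_spec (s : List Char) (c : Char) :
    (PySem.Chars.rfind s [c] = -1 ∧ ∀ i : Nat, s[i]? ≠ some c) ∨
    (∃ i : Nat, PySem.Chars.rfind s [c] = (i : Int) ∧ s[i]? = some c ∧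
      ∀ k : Nat, i < k → s[k]? ≠ some c) := by
  have hgo := pvGo_spec s c s.length
  have hnone : ∀ i : Nat, s.length ≤ i → s[i]? = none := by
    intro i hi; exact List.getElem?_eq_none hi
  rcases hgo with ⟨h1, h2⟩ | ⟨i, hi1, hi2, hi3, hi4⟩
  · left
    refine ⟨h1, ?_⟩
    intro i
    rcases Nat.le_total i s.length with h | h
    · exact h2 i h
    · rw [hnone i h]; simp
  · right
    refine ⟨i, hi1, hi3, ?_⟩
    intro k hk
    rcases Nat.le_total k s.length with h | h
    · exact hi4 k hk h
    · rw [hnone k h]; simp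

theorem pvA_isBest (cs : List Char) (c : Char) (start e : Int)
    (h0 : 0 ≤ start) (h1 : 0 ≤ e) (h2 : e ≤ (cs.length : Int)) :
    pvIsBest cs c start e (PySem.Chars.rfindFrom cs [c] start (some e)) := by
  have hstep : PySem.Chars.rfindFrom cs [c] start (some e)
      = (if e < start then -1
         else if PySem.Chars.rfind (List.drop start.toNat (List.take e.toNat cs)) [c] = -1 then -1
         else start + PySem.Chars.rfind (List.drop start.toNat (List.take e.toNat cs)) [c]) := by
    simp only [PySem.Chars.rfindFrom]
    rw [if_neg (not_lt.mpr h2), if_neg (not_lt.mpr h1), if_neg (not_lt.mpr h0)]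
  rw [hstep]
  by_cases hlt : e < start
  · rw [if_pos hlt]
    left
    exact ⟨rfl, fun i hai hib => absurd (lt_of_le_of_lt hai hib) (not_lt.mpr (le_of_lt hlt))⟩
  · rw [if_neg hlt]
    have hse : start ≤ e := not_lt.mp hlt
    have hu : ∀ d : Nat, start.toNat + d < e.toNat →
        (List.drop start.toNat (List.take e.toNat cs))[d]? = cs[start.toNat + d]? := by
      intro d hd
      rw [List.getElem?_drop, List.getElem?_take_of_lt hd]
    rcases pvRfind_spec (List.drop start.toNat (List.take e.toNat cs)) c with ⟨hr, hnone⟩ | ⟨i, hr, hc, hmax⟩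
    · rw [if_pos hr]
      left
      refine ⟨rfl, ?_⟩
      intro i hai hib hc
      have hd : start.toNat + (i - start.toNat) < e.toNat := by omega
      have := hnone (i - start.toNat)
      rw [hu _ hd] at this
      exact this (by rwa [show start.toNat + (i - start.toNat) = i by omega])
    · have hipos : PySem.Chars.rfind (List.drop start.toNat (List.take e.toNat cs)) [c] ≠ -1 := by
        rw [hr]; omega
      rw [if_neg hipos, hr]
      right
      have hlenu : i < (List.drop start.toNat (List.take e.toNat cs)).length := by
        by_contra h
        rw [List.getElem?_eq_none (by omega)] at hc
        simp at hc
      have hlen' : start.toNat + i < e.toNat := by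
        have := hlenu
        rw [List.length_drop, List.length_take] at this
        omega
      refine ⟨start.toNat + i, by push_cast; omega, by push_cast; omega, by push_cast; omega, ?_, ?_⟩
      · rw [← hu i hlen']; exact hc
      · intro k hk hkb hck
        have hke : k < e.toNat := by omega
        have hd : start.toNat + (k - start.toNat) < e.toNat := by omega
        have := hmax (k - start.toNat) (by omega)
        rw [hu _ hd] at this
        exact this (by rwa [show start.toNat + (k - start.toNat) = k by omega])

theorem pvPositions_mem (cs : List Char) (c : Char) (x : Int) :
    x ∈ pvPositions cs c ↔ ∃ i : Nat, x = (i : Int) ∧ cs[i]? = some c := by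
  unfold pvPositions
  simp only [List.mem_map, List.mem_filter, PySem.List.mem_enumerate_iff]
  constructor
  · rintro ⟨⟨xi, ch⟩, ⟨⟨k, hk, hpq⟩, hch⟩, rfl⟩
    have h1 : xi = (0:Int) + (k : Int) := congrArg Prod.fst hpq
    have h2 : ch = cs[k] := congrArg Prod.snd hpq
    refine ⟨k, by omega, ?_⟩
    rw [List.getElem?_eq_getElem hk, ← h2]
    simpa using hch
  · rintro ⟨i, rfl, hci⟩
    have hi : i < cs.length := by
      by_contra h
      rw [List.getElem?_eq_none (by omega)] at hci
      simp at hci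
    have hc : cs[i] = c := by
      rw [List.getElem?_eq_getElem hi] at hci
      exact Option.some.inj hci
    exact ⟨((i : Int), cs[i]), ⟨⟨i, hi, by simp⟩, by simpa using hc⟩, rfl⟩

theorem pvPositions_sorted (cs : List Char) (c : Char) :
    (pvPositions cs c).Pairwise (· < ·) := by
  unfold pvPositions
  exact List.pairwise_map.mpr
    ((PySem.List.pairwise_lt_enumerate cs 0).sublist List.filter_sublist)

theorem pvSp3_nonneg (start e sp2 : Int) (h0 : 0 ≤ start) (h1 : 0 ≤ e) :
    0 ≤ if sp2 = -1 ∨ sp2 ≤ start then e else sp2 := by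
  split_ifs with h
  · exact h1
  · rcases not_or.mp h with ⟨h1', h2'⟩
    omega

theorem pvB_isBest (cs : List Char) (c : Char) (start e : Int) :
    pvIsBest cs c start e (pvRightmostIn (pvPositions cs c) start e) := by
  set P := pvPositions cs c with hP
  have hsorted : P.Pairwise (· < ·) := by rw [hP]; exact pvPositions_sorted cs c
  obtain ⟨hkle, hlt, hge⟩ :=
    PySem.List.bisectLeft_spec P e (hsorted.imp (fun h => le_of_lt h))
  have hmono : ∀ (p q : Nat) (hq : q < P.length) (hpq : p ≤ q), P[p]'(by omega) ≤ P[q] := by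
    intro p q hq hpq
    rcases Nat.lt_or_ge p q with h | h
    · exact le_of_lt (List.pairwise_iff_getElem.mp hsorted p q (by omega) hq h)
    · have : p = q := by omega
      subst this; exact le_rfl
  simp only [pvRightmostIn]
  generalize hgk : PySem.List.bisectLeft P e = k at hkle hlt hge ⊢
  by_cases hkpos : 0 < k
  · have hidx : k - 1 < P.length := by omega
    have hval : (PySem.List.pyGet? P ((k : Int) - 1)).getD 0 = P[k-1] := by
      have hcast : ((k : Int) - 1) = ((k - 1 : Nat) : Int) := by omega
      rw [hcast, PySem.List.pyGet?_natCast, List.getElem?_eq_getElem hidx]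
      rfl
    rw [hval]
    by_cases hstart : start ≤ P[k-1]
    · rw [if_pos ⟨hkpos, hstart⟩]
      obtain ⟨i, hieq, hichar⟩ :=
        (pvPositions_mem cs c (P[k-1])).mp (List.getElem_mem hidx)
      right
      refine ⟨i, hieq, by omega, by rw [← hieq]; exact hlt (k-1) hidx (by omega), hichar, ?_⟩
      intro m him hmb hcm
      obtain ⟨j, hj, hjeq⟩ :=
        List.mem_iff_getElem.mp ((pvPositions_mem cs c (m : Int)).mpr ⟨m, rfl, hcm⟩)
      rcases Nat.lt_or_ge j k with hjk | hjk
      · have hle : P[j] ≤ P[k-1] := hmono j (k-1) hidx (by omega)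
        rw [hjeq, hieq] at hle
        have : m ≤ i := by exact_mod_cast hle
        omega
      · have := hge j hj hjk
        rw [hjeq] at this
        omega
    · rw [if_neg (by intro h; exact hstart h.2)]
      left
      refine ⟨rfl, ?_⟩
      intro i hai hib hci
      obtain ⟨j, hj, hjeq⟩ :=
        List.mem_iff_getElem.mp ((pvPositions_mem cs c (i : Int)).mpr ⟨i, rfl, hci⟩)
      rcases Nat.lt_or_ge j k with hjk | hjk
      · have hle : P[j] ≤ P[k-1] := hmono j (k-1) hidx (by omega)
        rw [hjeq] at hle
        omega
      · have := hge j hj hjk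
        rw [hjeq] at this
        omega
  · rw [if_neg (by intro h; exact hkpos h.1)]
    left
    refine ⟨rfl, ?_⟩
    intro i hai hib hci
    obtain ⟨j, hj, hjeq⟩ :=
      List.mem_iff_getElem.mp ((pvPositions_mem cs c (i : Int)).mpr ⟨i, rfl, hci⟩)
    have := hge j hj (by omega)
    rw [hjeq] at this
    omega

theorem pvFind_eq (cs : List Char) (c : Char) (start e : Int)
    (h0 : 0 ≤ start) (h1 : 0 ≤ e) (h2 : e ≤ (cs.length : Int)) :
    PySem.Chars.rfindFrom cs [c] start (some e) = pvRightmostIn (pvPositions cs c) start e :=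
  pvIsBest_unique cs c start e _ _ (pvA_isBest cs c start e h0 h1 h2) (pvB_isBest cs c start e)

theorem pvLoop_eq (block : String) (max_size : Int) (hm : 1 ≤ max_size) :
    ∀ (fuel : Nat) (start : Int), 0 ≤ start →
      pvALoop block max_size fuel start
        = pvBLoop block (pvPositions block.toList '.') (pvPositions block.toList ' ') max_size fuel start := by
  intro fuel
  induction fuel with
  | zero => intro start h0; rfl
  | succ fuel ih =>
    intro start h0
    simp only [pvALoop, pvBLoop]
    by_cases hlt : start < PySem.Str.len block
    · rw [if_pos hlt, if_pos hlt]
      by_cases hend : PySem.Str.len block ≤ start + max_size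
      · rw [if_pos hend, if_pos hend]
      · rw [if_neg hend, if_neg hend]
        have h1 : (0:Int) ≤ start + max_size := by omega
        have h2 : start + max_size ≤ (block.toList.length : Int) := by
          simpa using (not_le.mp hend).le
        have hdot : PySem.Str.rfindFrom block "." start (some (start + max_size))
            = pvRightmostIn (pvPositions block.toList '.') start (start + max_size) := by
          rw [PySem.Str.rfindFrom_eq, show (".".toList) = ['.'] from rfl]
          exact pvFind_eq block.toList '.' start (start + max_size) h0 h1 h2
        have hspace : PySem.Str.rfindFrom block " " start (some (start + max_size))
            = pvRightmostIn (pvPositions block.toList ' ') start (start + max_size) := by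
          rw [PySem.Str.rfindFrom_eq, show (" ".toList) = [' '] from rfl]
          exact pvFind_eq block.toList ' ' start (start + max_size) h0 h1 h2
        rw [hdot, hspace]
        congr 1
        exact ih _ (pvSp3_nonneg start (start + max_size) _ h0 h1)
    · rw [if_neg hlt, if_neg hlt]

-- ===== VERDICT (by name: the statement is the Claim_ definition above) =====
theorem split_large_block_spec : Claim_equal_split_large_block := by
  intro block max_size _hdom hpre
  unfold Spec_split_large_block split_large_block split_large_block_alt
  rcases hpre with h | h
  · subst h; rfl
  · simp only []
    rw [pvLoop_eq block max_size h block.toList.length 0 le_rfl]
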